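-- pv_equiv track=rewrite | github.com/nacs-970/cmu-cs67 | first-year/Semester 1 - 204111/Week 09/HW09_1_670510681 (1).py | left_max
-- ===== SOURCE A (Python) =====
-- def left_max(list_a:list[int]) -> list[int]:
--     list_a = list(filter(lambda x: x>=0,list_a))
--     if len(list_a) <= 1: return list_a
--     if list_a[0] >= list_a[1]:
--         list_a[1] = list_a[0]
--         now = list_a[1]
--         return [now] + left_max(list_a[1:])
--     now = list_a[0]
--     return [now] + left_max(list_a[1:])
-- ===== SOURCE B (Python) =====
-- def left_max(list_a: list[int]) -> list[int]:
--     out = []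
--     m = None
--     for x in list_a:
--         if x >= 0:
--             if m is None or x > m:
--                 m = x
--             out.append(m)
--     return out
-- ===== Notes on version B (the rewrite author's own statement) =====
-- stated objective: faster
-- what changed: Replaced the recursion that re-filters and re-slices the list at every step with a single linear pass keeping a running maximum.
import Mathlib
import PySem

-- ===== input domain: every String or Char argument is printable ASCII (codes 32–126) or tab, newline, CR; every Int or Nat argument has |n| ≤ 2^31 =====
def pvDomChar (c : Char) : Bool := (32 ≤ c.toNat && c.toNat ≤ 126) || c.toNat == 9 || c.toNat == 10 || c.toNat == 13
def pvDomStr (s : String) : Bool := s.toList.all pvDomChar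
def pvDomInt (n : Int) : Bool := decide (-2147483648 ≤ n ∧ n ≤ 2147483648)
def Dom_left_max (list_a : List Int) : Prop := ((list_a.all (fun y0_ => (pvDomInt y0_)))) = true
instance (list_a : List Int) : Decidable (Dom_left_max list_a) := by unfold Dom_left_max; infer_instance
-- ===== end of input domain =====

-- B replaces A's quadratic re-filtering/re-slicing recursion with one linear pass over the
-- input keeping a running maximum (faster: asymptotic, O(n^2) → O(n)).

-- ===== PORT A =====
-- A filters the non-negatives, returns the list if short, else writes max(first,second)
-- into slot 1 and recurses on the tail slice.
def left_max (list_a : List Int) : List Int :=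
  match hF : list_a.filter (fun x => decide ((0:Int) ≤ x)) with
  | [] => []
  | [a] => [a]
  | a :: b :: rest =>
    if a ≥ b then a :: left_max (a :: rest)
    else a :: left_max (b :: rest)
termination_by list_a.length
decreasing_by
  all_goals
    have h := List.length_filter_le (fun x => decide ((0:Int) ≤ x)) list_a
    rw [hF] at h
    simp at h ⊢
    omega

-- ===== PORT B =====
def left_max_alt (list_a : List Int) : List Int :=
  (list_a.foldl (fun (acc : List Int × Option Int) x =>
    if (0:Int) ≤ x then
      let m := match acc.2 with
        | none => x
        | some m0 => if x > m0 then x else m0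
      (acc.1 ++ [m], some m)
    else acc) ([], none)).1

-- ===== PRECONDITION & SPEC =====
def Spec_left_max (list_a : List Int) (out : List Int) : Prop := out = left_max_alt list_a
instance (list_a : List Int) (out : List Int) : Decidable (Spec_left_max list_a out) := by unfold Spec_left_max; infer_instance

-- ===== CLAIM (what is proved, stated in full; the proofs are below) =====
def Claim_equal_left_max : Prop := ∀ (list_a : List Int), Dom_left_max list_a → Spec_left_max list_a (left_max list_a)

-- ===== LEMMAS AND PROOFS =====

-- reference: prefix maxima of an (already filtered) list
def pmaxAux (m : Int) : List Int → List Int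
  | [] => []
  | x :: xs => (if x > m then x else m) :: pmaxAux (if x > m then x else m) xs

def pmax : List Int → List Int
  | [] => []
  | x :: xs => x :: pmaxAux x xs

theorem pmaxAux_max (a b : Int) (l : List Int) (h : b ≤ a) :
    pmaxAux a (b :: l) = a :: pmaxAux a l := by
  have hb : ¬ b > a := by omega
  simp [pmaxAux, hb]

theorem left_max_eq_pmax_filter (list_a : List Int) :
    left_max list_a = pmax (list_a.filter (fun x => decide ((0:Int) ≤ x))) := by
  induction hn : list_a.length using Nat.strong_induction_on generalizing list_a with
  | _ n ih =>
  rw [left_max]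
  split
  · next hF => rw [hF]; rfl
  · next a hF => rw [hF]; rfl
  · next a b rest hF =>
    have hlen := List.length_filter_le (fun x => decide ((0:Int) ≤ x)) list_a
    rw [hF] at hlen; simp at hlen
    have hmem : ∀ x ∈ a :: b :: rest, (0:Int) ≤ x := by
      intro x hx
      have := List.of_mem_filter (by rw [hF]; exact hx)
      simpa using this
    have hfa : (a :: rest).filter (fun x => decide ((0:Int) ≤ x)) = a :: rest := by
      apply List.filter_eq_self.mpr
      intro x hx
      simp only [decide_eq_true_eq]
      exact hmem x (by cases hx with
        | head => exact .head _
        | tail _ h => exact .tail _ (.tail _ h))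
    have hfb : (b :: rest).filter (fun x => decide ((0:Int) ≤ x)) = b :: rest := by
      apply List.filter_eq_self.mpr
      intro x hx
      simp only [decide_eq_true_eq]
      exact hmem x (.tail _ hx)
    rw [hF]
    split
    · next hab =>
      rw [ih (rest.length + 1) (by omega) (a :: rest) (by simp),
          hfa, pmax, pmax, pmaxAux_max a b rest hab]
    · next hab =>
      rw [ih (rest.length + 1) (by omega) (b :: rest) (by simp), hfb]
      simp only [pmax, pmaxAux]
      have : b > a := by omega
      simp [this]

-- B's result described by a structural function g
def gref (m : Option Int) : List Int → List Int
  | [] => []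
  | x :: xs =>
    if (0:Int) ≤ x then
      let m' := match m with
        | none => x
        | some m0 => if x > m0 then x else m0
      m' :: gref (some m') xs
    else gref m xs

theorem fold_fst (l : List Int) : ∀ (out : List Int) (m : Option Int),
    (l.foldl (fun (acc : List Int × Option Int) x =>
      if (0:Int) ≤ x then
        let m := match acc.2 with
          | none => x
          | some m0 => if x > m0 then x else m0
        (acc.1 ++ [m], some m)
      else acc) (out, m)).1 = out ++ gref m l := by
  induction l with
  | nil => intro out m; simp [gref]
  | cons x xs ih =>
    intro out m
    by_cases hx : (0:Int) ≤ x
    · cases m with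
      | none => simp [gref, hx, ih, List.append_assoc]
      | some m0 => simp [gref, hx, ih, List.append_assoc]
    · simp [gref, hx, ih]

theorem gref_some (l : List Int) : ∀ m0 : Int,
    gref (some m0) l = pmaxAux m0 (l.filter (fun x => decide ((0:Int) ≤ x))) := by
  induction l with
  | nil => intro m0; rfl
  | cons x xs ih =>
    intro m0
    by_cases hx : (0:Int) ≤ x
    · simp [gref, hx, pmaxAux, ih]
    · simp [gref, hx, ih]

theorem gref_none (l : List Int) :
    gref none l = pmax (l.filter (fun x => decide ((0:Int) ≤ x))) := by
  induction l with
  | nil => rfl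
  | cons x xs ih =>
    by_cases hx : (0:Int) ≤ x
    · simp [gref, hx, pmax, gref_some]
    · simp [gref, hx, ih]

theorem alt_eq_pmax_filter (list_a : List Int) :
    left_max_alt list_a = pmax (list_a.filter (fun x => decide ((0:Int) ≤ x))) := by
  rw [left_max_alt, fold_fst, gref_none]; rfl

-- ===== VERDICT (by name: the statement is the Claim_ definition above) =====
theorem left_max_spec : Claim_equal_left_max := by
  intro list_a _
  unfold Spec_left_max
  rw [left_max_eq_pmax_filter, alt_eq_pmax_filter]
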